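-- pv_equiv track=rewrite | github.com/moverton7474/milton-ai-publicist | module_iv/news_monitor.py | _suggest_media
-- ===== SOURCE A (Python) =====
-- from typing import List, Dict, Optional
--
-- def _suggest_media(news_item: Dict) -> str:
--     """Suggest what type of media would work well"""
--     title = news_item['title'].lower()
--
--     if any(word in title for word in ["win", "victory", "champion"]):
--         return "Action photo or game highlights video"
--     elif any(word in title for word in ["recruit", "commit"]):
--         return "Player photo with KSU uniform template"
--     elif "partner" in title:
--         return "Branded graphic with partner logo"
--     else:
--         return "KSU branded graphic with key quote"
-- ===== SOURCE B (Python) =====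
-- _KEYWORD_PRIORITY = [
--     ("win", 0), ("victory", 0), ("champion", 0),
--     ("recruit", 1), ("commit", 1),
--     ("partner", 2),
-- ]
--
-- _MEDIA = [
--     "Action photo or game highlights video",
--     "Player photo with KSU uniform template",
--     "Branded graphic with partner logo",
--     "KSU branded graphic with key quote",
-- ]
--
-- def _suggest_media(news_item):
--     """Suggest what type of media would work well"""
--     title = news_item['title'].lower()
--     best = 3  # index of the default media
--     for i in range(len(title)):          # text-driven scan over every position
--         for kw, pr in _KEYWORD_PRIORITY:
--             if title.startswith(kw, i):
--                 best = min(best, pr)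
--     return _MEDIA[best]
-- ===== Notes on version B (the rewrite author's own statement) =====
-- stated objective: alternative
-- what changed: Replaced the rule-driven if/elif substring chain by a text-driven scan: one pass over every position of the lowered title, keeping the minimum priority of any keyword that starts there, then indexing a media table by that priority.
import Mathlib
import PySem

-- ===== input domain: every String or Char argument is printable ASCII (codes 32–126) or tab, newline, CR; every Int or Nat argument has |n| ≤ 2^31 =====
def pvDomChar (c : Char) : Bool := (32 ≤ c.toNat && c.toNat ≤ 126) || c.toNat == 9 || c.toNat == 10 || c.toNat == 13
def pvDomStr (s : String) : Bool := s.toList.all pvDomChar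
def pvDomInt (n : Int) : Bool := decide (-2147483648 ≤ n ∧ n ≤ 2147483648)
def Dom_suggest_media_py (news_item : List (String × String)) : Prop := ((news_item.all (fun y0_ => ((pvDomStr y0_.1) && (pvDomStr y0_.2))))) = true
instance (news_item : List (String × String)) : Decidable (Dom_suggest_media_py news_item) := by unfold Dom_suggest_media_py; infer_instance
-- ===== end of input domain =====

-- B replaces A's if/elif substring chain by a single text-driven scan: one pass over every
-- position of the lowered title, keeping the minimum priority of any keyword starting there
-- (alternative decomposition, same outputs everywhere A returns).

-- ===== PORT A =====
def suggest_media_py (news_item : List (String × String)) : String :=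
  -- title = news_item['title'].lower(); under Pre_ the key is present, so getD "" is never the default
  let title := PySem.Str.lower ((news_item.lookup "title").getD "")
  if ["win", "victory", "champion"].any (fun word => PySem.Str.isIn word title) then
    "Action photo or game highlights video"
  else if ["recruit", "commit"].any (fun word => PySem.Str.isIn word title) then
    "Player photo with KSU uniform template"
  else if PySem.Str.isIn "partner" title then
    "Branded graphic with partner logo"
  else
    "KSU branded graphic with key quote"

-- ===== PORT B =====
def smKw : List (String × Nat) :=
  [("win", 0), ("victory", 0), ("champion", 0), ("recruit", 1), ("commit", 1), ("partner", 2)]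

def smMedia : List String :=
  [ "Action photo or game highlights video",
    "Player photo with KSU uniform template",
    "Branded graphic with partner logo",
    "KSU branded graphic with key quote" ]

def suggest_media_py_alt (news_item : List (String × String)) : String :=
  let title := PySem.Str.lower ((news_item.lookup "title").getD "")
  let chars := title.toList
  -- for i in range(len(title)): for kw, pr in _KEYWORD_PRIORITY: if title.startswith(kw, i): best = min(best, pr)
  -- title.startswith(kw, i) is ported as Chars.startswith on (chars.drop i): exact since 0 ≤ i ≤ len(title)
  let best := (List.range chars.length).foldl
    (fun best i => smKw.foldl
      (fun b p => if PySem.Chars.startswith (chars.drop i) p.1.toList then min b p.2 else b) best) 3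
  smMedia.getD best ""

-- ===== PRECONDITION & SPEC =====
-- Pre_ excludes exactly the dicts without a 'title' key, where the Python A raises KeyError.
def Pre_suggest_media_py (news_item : List (String × String)) : Prop :=
  (news_item.lookup "title").isSome = true
instance (news_item : List (String × String)) : Decidable (Pre_suggest_media_py news_item) := by
  unfold Pre_suggest_media_py; infer_instance
def pvWitness_suggest_media_py : (List (String × String)) := [("title", "Big win tonight")]

def Spec_suggest_media_py (news_item : List (String × String)) (out : String) : Prop := out = suggest_media_py_alt news_item
instance (news_item : List (String × String)) (out : String) : Decidable (Spec_suggest_media_py news_item out) := by unfold Spec_suggest_media_py; infer_instance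

-- ===== CLAIM (what is proved, stated in full; the proofs are below) =====
def Claim_equal_suggest_media_py : Prop := ∀ (news_item : List (String × String)), Dom_suggest_media_py news_item → Pre_suggest_media_py news_item → Spec_suggest_media_py news_item (suggest_media_py news_item)

-- ===== LEMMAS AND PROOFS =====

-- startswith at position i
def smSw (L kw : List Char) (i : Nat) : Bool := PySem.Chars.startswith (L.drop i) kw

-- least keyword priority matched at position i (3 if none)
def smPos (L : List Char) (i : Nat) : Nat :=
  if smSw L "win".toList i || smSw L "victory".toList i || smSw L "champion".toList i then 0
  else if smSw L "recruit".toList i || smSw L "commit".toList i then 1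
  else if smSw L "partner".toList i then 2
  else 3

lemma smStep_eq (L : List Char) (b i : Nat) (hb : b ≤ 3) :
    smKw.foldl
      (fun b p => if PySem.Chars.startswith (L.drop i) p.1.toList then min b p.2 else b) b
      = min b (smPos L i) := by
  simp only [smKw, List.foldl_cons, List.foldl_nil, smPos, smSw]
  split_ifs <;> simp_all <;> omega

def smMinF (L : List Char) (idxs : List Nat) (b : Nat) : Nat :=
  idxs.foldl (fun a i => min a (smPos L i)) b

lemma smOuter_eq (L : List Char) (idxs : List Nat) (b : Nat) (hb : b ≤ 3) :
    idxs.foldl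
      (fun best i => smKw.foldl
        (fun b p => if PySem.Chars.startswith (L.drop i) p.1.toList then min b p.2 else b) best) b
      = smMinF L idxs b := by
  induction idxs generalizing b with
  | nil => rfl
  | cons i rest ih =>
    simp only [List.foldl_cons, smMinF] at *
    rw [smStep_eq L b i hb]
    exact ih _ (le_trans (Nat.min_le_left _ _) hb)

lemma smMinF_le_init (L : List Char) (idxs : List Nat) (b : Nat) : smMinF L idxs b ≤ b := by
  induction idxs generalizing b with
  | nil => simp [smMinF]
  | cons i rest ih =>
    calc smMinF L (i :: rest) b = smMinF L rest (min b (smPos L i)) := rfl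
    _ ≤ min b (smPos L i) := ih _
    _ ≤ b := Nat.min_le_left _ _

lemma smMinF_le_mem (L : List Char) (idxs : List Nat) (b i : Nat) (h : i ∈ idxs) :
    smMinF L idxs b ≤ smPos L i := by
  induction idxs generalizing b with
  | nil => cases h
  | cons j rest ih =>
    rcases List.mem_cons.mp h with h | h
    · subst h
      calc smMinF L (i :: rest) b = smMinF L rest (min b (smPos L i)) := rfl
      _ ≤ min b (smPos L i) := smMinF_le_init _ _ _
      _ ≤ smPos L i := Nat.min_le_right _ _
    · exact ih _ h

lemma smMinF_lb (L : List Char) (idxs : List Nat) (b k : Nat)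
    (hb : k ≤ b) (h : ∀ i ∈ idxs, k ≤ smPos L i) : k ≤ smMinF L idxs b := by
  induction idxs generalizing b with
  | nil => simpa [smMinF] using hb
  | cons i rest ih =>
    have : k ≤ min b (smPos L i) :=
      le_min hb (h i (List.mem_cons_self ..))
    exact ih _ this (fun j hj => h j (List.mem_cons_of_mem _ hj))

-- keyword occurs as substring → it starts at some in-range position
lemma smIsIn_exists (L kw : List Char) (hk : kw ≠ [])
    (h : PySem.Chars.isIn kw L = true) : ∃ j < L.length, smSw L kw j = true := by
  obtain ⟨j, hj⟩ := (PySem.Chars.exists_prefix_drop_iff_isIn kw L).mpr h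
  refine ⟨j, ?_, ?_⟩
  · by_contra hlt
    push_neg at hlt
    rw [List.drop_eq_nil_iff.mpr hlt] at hj
    exact hk (List.prefix_nil.mp hj)
  · exact (PySem.Chars.startswith_iff _ _).mpr hj

lemma smNot_isIn (L kw : List Char)
    (h : PySem.Chars.isIn kw L = false) (j : Nat) : smSw L kw j = false := by
  by_contra hs
  rw [Bool.not_eq_false] at hs
  have : PySem.Chars.isIn kw L = true :=
    (PySem.Chars.exists_prefix_drop_iff_isIn kw L).mp
      ⟨j, (PySem.Chars.startswith_iff _ _).mp hs⟩
  simp [h] at this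

lemma smPos_zero (L : List Char) (j : Nat)
    (h : smSw L "win".toList j = true ∨ smSw L "victory".toList j = true ∨
         smSw L "champion".toList j = true) : smPos L j = 0 := by
  unfold smPos
  rcases h with h | h | h <;> rw [h] <;> simp

lemma smPos_le_one (L : List Char) (j : Nat)
    (h : smSw L "recruit".toList j = true ∨ smSw L "commit".toList j = true) :
    smPos L j ≤ 1 := by
  unfold smPos
  rcases h with h | h <;> split_ifs <;> simp_all

lemma smPos_le_two (L : List Char) (j : Nat)
    (h : smSw L "partner".toList j = true) : smPos L j ≤ 2 := by
  unfold smPos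
  split_ifs <;> simp_all

-- the value of the min-fold equals A's chain index
lemma smBest_eq (L : List Char) :
    smMinF L (List.range L.length) 3 =
      (if PySem.Chars.isIn "win".toList L || PySem.Chars.isIn "victory".toList L
          || PySem.Chars.isIn "champion".toList L then 0
       else if PySem.Chars.isIn "recruit".toList L || PySem.Chars.isIn "commit".toList L then 1
       else if PySem.Chars.isIn "partner".toList L then 2
       else 3) := by
  split_ifs with h0 h1 h2
  · rcases Bool.or_eq_true_iff.mp h0 with h | h
    rcases Bool.or_eq_true_iff.mp h with h | h
    · obtain ⟨j, hj, hs⟩ := smIsIn_exists L "win".toList (by decide) h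
      have := smMinF_le_mem L (List.range L.length) 3 j (List.mem_range.mpr hj)
      have hp := smPos_zero L j (Or.inl hs); omega
    · obtain ⟨j, hj, hs⟩ := smIsIn_exists L "victory".toList (by decide) h
      have := smMinF_le_mem L (List.range L.length) 3 j (List.mem_range.mpr hj)
      have hp := smPos_zero L j (Or.inr (Or.inl hs)); omega
    · obtain ⟨j, hj, hs⟩ := smIsIn_exists L "champion".toList (by decide) h
      have := smMinF_le_mem L (List.range L.length) 3 j (List.mem_range.mpr hj)
      have hp := smPos_zero L j (Or.inr (Or.inr hs)); omega
  · rw [Bool.or_eq_true_iff, Bool.or_eq_true_iff] at h0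
    push_neg at h0
    obtain ⟨⟨hw, hv⟩, hc⟩ := h0
    have lb : ∀ i ∈ List.range L.length, 1 ≤ smPos L i := by
      intro i _
      have w := smNot_isIn L _ (Bool.eq_false_iff.mpr hw) i
      have v := smNot_isIn L _ (Bool.eq_false_iff.mpr hv) i
      have c := smNot_isIn L _ (Bool.eq_false_iff.mpr hc) i
      unfold smPos
      rw [w, v, c]
      simp
      split_ifs <;> omega
    have hge := smMinF_lb L (List.range L.length) 3 1 (by omega) lb
    rcases Bool.or_eq_true_iff.mp h1 with h | h
    · obtain ⟨j, hj, hs⟩ := smIsIn_exists L "recruit".toList (by decide) h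
      have := smMinF_le_mem L (List.range L.length) 3 j (List.mem_range.mpr hj)
      have hp := smPos_le_one L j (Or.inl hs); omega
    · obtain ⟨j, hj, hs⟩ := smIsIn_exists L "commit".toList (by decide) h
      have := smMinF_le_mem L (List.range L.length) 3 j (List.mem_range.mpr hj)
      have hp := smPos_le_one L j (Or.inr hs); omega
  · rw [Bool.or_eq_true_iff, Bool.or_eq_true_iff] at h0
    rw [Bool.or_eq_true_iff] at h1
    push_neg at h0 h1
    obtain ⟨⟨hw, hv⟩, hc⟩ := h0
    obtain ⟨hr, hm⟩ := h1
    have lb : ∀ i ∈ List.range L.length, 2 ≤ smPos L i := by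
      intro i _
      have w := smNot_isIn L _ (Bool.eq_false_iff.mpr hw) i
      have v := smNot_isIn L _ (Bool.eq_false_iff.mpr hv) i
      have c := smNot_isIn L _ (Bool.eq_false_iff.mpr hc) i
      have r := smNot_isIn L _ (Bool.eq_false_iff.mpr hr) i
      have m := smNot_isIn L _ (Bool.eq_false_iff.mpr hm) i
      unfold smPos
      rw [w, v, c, r, m]
      simp
      split_ifs <;> omega
    have hge := smMinF_lb L (List.range L.length) 3 2 (by omega) lb
    obtain ⟨j, hj, hs⟩ := smIsIn_exists L "partner".toList (by decide) h2
    have := smMinF_le_mem L (List.range L.length) 3 j (List.mem_range.mpr hj)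
    have hp := smPos_le_two L j hs; omega
  · rw [Bool.or_eq_true_iff, Bool.or_eq_true_iff] at h0
    rw [Bool.or_eq_true_iff] at h1
    push_neg at h0 h1
    obtain ⟨⟨hw, hv⟩, hc⟩ := h0
    obtain ⟨hr, hm⟩ := h1
    have lb : ∀ i ∈ List.range L.length, 3 ≤ smPos L i := by
      intro i _
      have w := smNot_isIn L _ (Bool.eq_false_iff.mpr hw) i
      have v := smNot_isIn L _ (Bool.eq_false_iff.mpr hv) i
      have c := smNot_isIn L _ (Bool.eq_false_iff.mpr hc) i
      have r := smNot_isIn L _ (Bool.eq_false_iff.mpr hr) i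
      have m := smNot_isIn L _ (Bool.eq_false_iff.mpr hm) i
      have p := smNot_isIn L _ (Bool.eq_false_iff.mpr h2) i
      unfold smPos
      rw [w, v, c, r, m, p]
      simp
    have hge := smMinF_lb L (List.range L.length) 3 3 (by omega) lb
    have hle := smMinF_le_init L (List.range L.length) 3
    omega

-- ===== VERDICT (by name: the statement is the Claim_ definition above) =====
theorem suggest_media_py_spec : Claim_equal_suggest_media_py := by
  intro news_item _ _
  show suggest_media_py news_item = suggest_media_py_alt news_item
  simp only [suggest_media_py, suggest_media_py_alt]
  set t := PySem.Str.lower ((news_item.lookup "title").getD "") with ht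
  rw [smOuter_eq t.toList (List.range t.toList.length) 3 (by omega), smBest_eq]
  simp only [List.any_cons, List.any_nil, Bool.or_false, PySem.Str.isIn_eq]
  split_ifs <;> simp_all [smMedia]
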